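-- pv_equiv track=rewrite | github.com/delf1/aoc2022 | day1/day1.py | parse
-- ===== SOURCE A (Python) =====
-- def parse(lines: list[str]) -> list[list[int]]:
--     elves = []
--     buffer = []
--     for line in lines:
--         if line == '\n':
--             elves.append(buffer)
--             buffer = []
--         else:
--             buffer.append(int(line))
--     return elves
-- ===== SOURCE B (Python) =====
-- def parse(lines: list[str]) -> list[list[int]]:
--     # phase 1: parse every line up-front (None marks a separator)
--     values = [None if line == '\n' else int(line) for line in lines]
--     # phase 2: slice between separators
--     groups = []
--     prev = 0
--     for i, v in enumerate(values):
--         if v is None: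
--             groups.append(values[prev:i])
--             prev = i + 1
--     return groups
-- ===== Notes on version B (the rewrite author's own statement) =====
-- stated objective: alternative
-- what changed: B parses every line up-front into a values list (None marking blank-line separators), then builds each group by slicing that list between consecutive separators, instead of A's single pass that accumulates a mutable buffer.
import Mathlib
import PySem

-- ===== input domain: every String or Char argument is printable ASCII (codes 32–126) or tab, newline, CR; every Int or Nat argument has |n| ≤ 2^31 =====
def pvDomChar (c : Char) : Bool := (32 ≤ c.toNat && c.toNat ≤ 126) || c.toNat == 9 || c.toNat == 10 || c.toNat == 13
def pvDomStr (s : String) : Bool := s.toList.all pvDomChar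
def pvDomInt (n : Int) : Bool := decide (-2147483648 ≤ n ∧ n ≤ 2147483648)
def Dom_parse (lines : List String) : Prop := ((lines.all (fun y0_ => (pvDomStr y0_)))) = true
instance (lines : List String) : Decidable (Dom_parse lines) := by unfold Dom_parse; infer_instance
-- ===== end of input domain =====

-- B parses every line up-front, then slices the parsed list between separators; same cost as A's accumulating pass, different decomposition.

-- ===== PORT A =====
def parse (lines : List String) : List (List Int) :=
  (lines.foldl
    (fun (st : List (List Int) × List Int) line =>
      if line = "\n" then (st.1 ++ [st.2], ([] : List Int))
      else (st.1, st.2 ++ [(PySem.Int.ofStr? line).getD 0]))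
    ([], [])).1

-- ===== PORT B =====
-- In Source B the sliced group values[prev:i] holds only ints at runtime (no None between
-- separators); the '.getD 0' below makes that implicit unwrapping explicit — exact on
-- every input Pre_parse admits.
def parse_alt (lines : List String) : List (List Int) :=
  let values := lines.map
    (fun line => if line = "\n" then (none : Option Int)
                 else some ((PySem.Int.ofStr? line).getD 0))
  ((PySem.List.enumerate values).foldl
    (fun (st : List (List Int) × Int) p =>
      match p.2 with
      | none => (st.1 ++ [(PySem.List.slice values (some st.2) (some p.1)).map
                            (fun v => v.getD 0)], p.1 + 1)
      | some _ => st)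
    ([], 0)).1

-- ===== PRECONDITION & SPEC =====
-- Pre_ excludes exactly the inputs where Python's int(line) raises ValueError on a non-blank line (both Pythons raise there).
def Pre_parse (lines : List String) : Prop :=
  (lines.all (fun l => l == "\n" || (PySem.Int.ofStr? l).isSome)) = true
instance (lines : List String) : Decidable (Pre_parse lines) := by unfold Pre_parse; infer_instance
def pvWitness_parse : List String := ["1", " 2 ", "\n", "+3", "\n", "\n", "-4"]
def Spec_parse (lines : List String) (out : List (List Int)) : Prop := out = parse_alt lines
instance (lines : List String) (out : List (List Int)) : Decidable (Spec_parse lines out) := by unfold Spec_parse; infer_instance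

-- ===== CLAIM (what is proved, stated in full; the proofs are below) =====
def Claim_equal_parse : Prop := ∀ (lines : List String), Dom_parse lines → Pre_parse lines → Spec_parse lines (parse lines)

-- ===== LEMMAS AND PROOFS =====

-- per-line parse as B performs it
def lineVal (line : String) : Option Int :=
  if line = "\n" then none else some ((PySem.Int.ofStr? line).getD 0)

-- common reference recursion: remaining lines, pending buffer
def goA : List String → List Int → List (List Int)
  | [], _ => []
  | l :: ls, buf =>
      if l = "\n" then buf :: goA ls []
      else goA ls (buf ++ [(PySem.Int.ofStr? l).getD 0])

theorem parseA_foldl (ls : List String) :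
    ∀ (elves : List (List Int)) (buf : List Int),
    (ls.foldl
      (fun (st : List (List Int) × List Int) line =>
        if line = "\n" then (st.1 ++ [st.2], ([] : List Int))
        else (st.1, st.2 ++ [(PySem.Int.ofStr? line).getD 0]))
      (elves, buf)).1 = elves ++ goA ls buf := by
  induction ls with
  | nil => intro elves buf; simp [goA]
  | cons l ls ih =>
      intro elves buf
      by_cases h : l = "\n" <;> simp [goA, h, ih]

theorem parseB_key (ls : List String) :
    ∀ (k j : Nat) (vfull : List (Option Int)) (acc : List (List Int)),
    vfull.drop k = ls.map lineVal → j ≤ k →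
    ((PySem.List.enumerate (ls.map lineVal) (k : Int)).foldl
      (fun (st : List (List Int) × Int) p =>
        match p.2 with
        | none => (st.1 ++ [(PySem.List.slice vfull (some st.2) (some p.1)).map
                              (fun v => v.getD 0)], p.1 + 1)
        | some _ => st)
      (acc, (j : Int))).1
    = acc ++ goA ls ((PySem.List.slice vfull (some (j : Int)) (some (k : Int))).map
                      (fun v => v.getD 0)) := by
  induction ls with
  | nil => intro k j vfull acc _ _; simp [goA]
  | cons l ls ih =>
      intro k j vfull acc hdrop hjk
      have hk : k < vfull.length := by
        by_contra h
        have h0 : vfull.drop k = [] := List.drop_eq_nil_of_le (by omega)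
        rw [hdrop] at h0
        simp at h0
      have hdrop' : vfull.drop (k + 1) = ls.map lineVal := by
        rw [← List.drop_drop, hdrop, List.drop_one, List.map_cons, List.tail_cons]
      have hget : vfull[k] = lineVal l := by
        have h1 : (vfull.drop k)[0]? = some (lineVal l) := by rw [hdrop]; rfl
        rw [List.getElem?_drop, Nat.add_zero, List.getElem?_eq_getElem hk] at h1
        exact Option.some.inj h1
      have hcast : ((k : Int) + 1) = ((k + 1 : Nat) : Int) := by push_cast; ring
      rw [List.map_cons, PySem.List.enumerate_cons, List.foldl_cons]
      by_cases h : l = "\n"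
      · -- separator at position k
        have hfl : lineVal l = none := by simp [lineVal, h]
        simp only [hfl]
        rw [hcast, ih (k + 1) (k + 1) vfull
              (acc ++ [(PySem.List.slice vfull (some (j : Int)) (some (k : Int))).map
                (fun v => v.getD 0)]) hdrop' (le_refl _)]
        have hslice : PySem.List.slice vfull (some ((k + 1 : Nat) : Int)) (some ((k + 1 : Nat) : Int)) = [] := by
          rw [PySem.List.slice_natCast]; simp
        rw [hslice]
        simp [goA, h]
      · -- parsed int at position k
        have hfl : lineVal l = some ((PySem.Int.ofStr? l).getD 0) := by simp [lineVal, h]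
        simp only [hfl]
        rw [hcast, ih (k + 1) j vfull acc hdrop' (by omega)]
        have hslice : PySem.List.slice vfull (some (j : Int)) (some ((k + 1 : Nat) : Int))
            = PySem.List.slice vfull (some (j : Int)) (some (k : Int)) ++ [lineVal l] := by
          rw [PySem.List.slice_natCast, PySem.List.slice_natCast]
          have hlen : k - j < (vfull.drop j).length := by
            rw [List.length_drop]; omega
          have h2 : k + 1 - j = (k - j) + 1 := by omega
          rw [h2, List.take_add_one]
          congr 1
          have h3 : (vfull.drop j)[k - j] = lineVal l := by
            rw [List.getElem_drop]
            have h4 : j + (k - j) = k := by omega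
            simp [h4, hget]
          simp [List.getElem?_eq_getElem hlen, h3]
        rw [hslice, hfl]
        simp [goA, h]

-- ===== VERDICT (by name: the statement is the Claim_ definition above) =====
theorem parse_spec : Claim_equal_parse := by
  intro lines _ _
  unfold Spec_parse parse
  rw [parseA_foldl lines [] []]
  have hb := parseB_key lines 0 0 (lines.map lineVal) [] rfl (le_refl 0)
  have h0 : PySem.List.slice (lines.map lineVal) (some ((0 : Nat) : Int)) (some ((0 : Nat) : Int)) = [] := by
    rw [PySem.List.slice_natCast]; simp
  rw [h0, List.map_nil] at hb
  exact hb.symm
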